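-- pv_equiv track=rewrite | github.com/songzy12/HackerRank | Algorithms/Strings/medium/sherlock_and_anagrams.py | compute_pairs_of_length
-- ===== SOURCE A (Python) =====
-- def compute_pairs_of_length(s, l):
--     ans = 0
--
--     m = {}
--     cur = [0 for i in range(26)]
--     for i in range(l):
--         cur[ord(s[i]) - ord("a")] += 1
--     m[tuple(cur)] = 1
--
--     for i in range(l, len(s)):
--         cur[ord(s[i - l]) - ord("a")] -= 1
--         cur[ord(s[i]) - ord("a")] += 1
--         if tuple(cur) in m:
--             ans += m[tuple(cur)]
--             m[tuple(cur)] += 1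
--         else:
--             m[tuple(cur)] = 1
--     return ans
-- ===== SOURCE B (Python) =====
-- def compute_pairs_of_length(s, l):
--     # prefix sums of letter counts; window signature = difference of two prefixes,
--     # then group windows by signature and count pairs per group
--     pre = [(0,) * 26]
--     cur = [0] * 26
--     for c in s:
--         cur[ord(c) - ord("a")] += 1
--         pre.append(tuple(cur))
--     counts = {}
--     for j in range(len(s) - l + 1):
--         a, b = pre[j], pre[j + l]
--         t = tuple(b[k] - a[k] for k in range(26))
--         counts[t] = counts.get(t, 0) + 1
--     return sum(c * (c - 1) // 2 for c in counts.values())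
-- ===== Notes on version B (the rewrite author's own statement) =====
-- stated objective: alternative
-- what changed: A slides one frequency vector along the string and accumulates pair counts on the fly in a seen-so-far dict; B builds a prefix-sum table of letter counts, obtains each window's signature as the componentwise difference of two prefixes, groups windows by signature and returns sum(c*(c-1)//2) over the group sizes.
import Mathlib
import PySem

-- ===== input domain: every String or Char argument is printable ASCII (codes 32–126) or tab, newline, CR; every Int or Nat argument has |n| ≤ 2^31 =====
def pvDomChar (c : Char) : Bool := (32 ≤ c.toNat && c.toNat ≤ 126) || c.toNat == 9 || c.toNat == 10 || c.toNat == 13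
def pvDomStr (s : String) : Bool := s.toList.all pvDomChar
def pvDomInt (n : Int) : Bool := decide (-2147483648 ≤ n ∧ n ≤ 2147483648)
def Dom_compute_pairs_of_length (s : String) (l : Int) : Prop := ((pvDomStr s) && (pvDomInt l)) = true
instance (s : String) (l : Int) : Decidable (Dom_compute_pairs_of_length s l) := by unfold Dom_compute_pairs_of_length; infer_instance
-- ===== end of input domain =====

-- B drops A's sliding vector and running seen-so-far dict: it builds a prefix-sum table of
-- letter counts, forms each window's signature as a difference of two prefixes, groups the
-- windows by signature and returns sum over groups of c*(c-1)//2. Objective: alternative.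

-- ===== PORT A =====
-- index expression ord(s[i]) - ord("a")
def pvChIdx (cs : List Char) (i : Int) : Int :=
  ((PySem.List.pyGetD cs i 'a').toNat : Int) - 97

-- cur[j] += d  (Python list index semantics; out-of-range is excluded by Pre_)
def pvBump (cur : List Int) (j : Int) (d : Int) : List Int :=
  PySem.List.pySetD cur j (PySem.List.pyGetD cur j 0 + d)

-- one iteration of A's sliding loop: cur[...] -= 1; cur[...] += 1
def pvSlide (cs : List Char) (l : Int) (cur : List Int) (i : Int) : List Int :=
  pvBump (pvBump cur (pvChIdx cs (i - l)) (-1)) (pvChIdx cs i) 1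

-- A's loop body: slide, then `if tuple(cur) in m: ans += m[...]; m[...] += 1 else: m[...] = 1`
def pvAStep (cs : List Char) (l : Int)
    (st : Int × PySem.Dict (List Int) Int × List Int) (i : Int) :
    Int × PySem.Dict (List Int) Int × List Int :=
  let cur := pvSlide cs l st.2.2 i
  match st.2.1.get? cur with
  | some v => (st.1 + v, st.2.1.insert cur (v + 1), cur)
  | none => (st.1, st.2.1.insert cur 1, cur)

def compute_pairs_of_length (s : String) (l : Int) : Int :=
  let cs := s.toList
  let cur0 : List Int := (PySem.List.pyRange 0 26 1).map (fun _ => (0 : Int))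
  let cur1 := (PySem.List.pyRange 0 l 1).foldl (fun cur i => pvBump cur (pvChIdx cs i) 1) cur0
  let st := (PySem.List.pyRange l (cs.length : Int) 1).foldl (pvAStep cs l)
      ((0 : Int), (PySem.Dict.empty.insert cur1 1 : PySem.Dict (List Int) Int), cur1)
  st.1

-- ===== PORT B =====
def compute_pairs_of_length_alt (s : String) (l : Int) : Int :=
  let cs := s.toList
  -- pre = [(0,)*26]; cur = [0]*26; for c in s: cur[ord(c)-97] += 1; pre.append(tuple(cur))
  let pc := cs.foldl
    (fun (st : List (List Int) × List Int) c =>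
      let cur := PySem.List.pySetD st.2 ((c.toNat : Int) - 97)
        (PySem.List.pyGetD st.2 ((c.toNat : Int) - 97) 0 + 1)
      (st.1 ++ [cur], cur))
    ([List.replicate 26 0], List.replicate 26 0)
  -- for j in range(len(s)-l+1): t = tuple(pre[j+l][k] - pre[j][k] for k in range(26)); count it
  let counts := (PySem.List.pyRange 0 ((cs.length : Int) - l + 1) 1).foldl
    (fun (d : PySem.Dict (List Int) Int) j =>
      let a := PySem.List.pyGetD pc.1 j []
      let b := PySem.List.pyGetD pc.1 (j + l) []
      let t := (PySem.List.pyRange 0 26 1).map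
        (fun k => PySem.List.pyGetD b k 0 - PySem.List.pyGetD a k 0)
      d.insert t (d.getD t 0 + 1))
    PySem.Dict.empty
  counts.values.foldl (fun acc c => acc + PySem.Int.floordiv (c * (c - 1)) 2) 0

-- ===== PRECONDITION & SPEC =====
-- A raises IndexError exactly when l < 0, l > len(s), or some character c of s has
-- ord(c) - 97 outside [-26, 25] (i.e. ord(c) outside 71..122); Pre_ excludes exactly those.
def Pre_compute_pairs_of_length (s : String) (l : Int) : Prop :=
  0 ≤ l ∧ l ≤ (s.toList.length : Int) ∧ s.toList.all (fun c => 71 ≤ c.toNat && c.toNat ≤ 122) = true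
instance (s : String) (l : Int) : Decidable (Pre_compute_pairs_of_length s l) := by
  unfold Pre_compute_pairs_of_length; infer_instance

def pvWitness_compute_pairs_of_length : String × Int := ("abab", 2)

def Spec_compute_pairs_of_length (s : String) (l : Int) (out : Int) : Prop := out = compute_pairs_of_length_alt s l
instance (s : String) (l : Int) (out : Int) : Decidable (Spec_compute_pairs_of_length s l out) := by unfold Spec_compute_pairs_of_length; infer_instance

-- ===== CLAIM (what is proved, stated in full; the proofs are below) =====
def Claim_equal_compute_pairs_of_length : Prop := ∀ (s : String) (l : Int), Dom_compute_pairs_of_length s l → Pre_compute_pairs_of_length s l → Spec_compute_pairs_of_length s l (compute_pairs_of_length s l)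

-- ===== LEMMAS AND PROOFS =====

-- ---- generic bump machinery (shared vocabulary of the two ports' inner updates) ----

def pvGood (c : Char) : Prop := 71 ≤ c.toNat ∧ c.toNat ≤ 122

-- B's per-character update, named
def pvBmp (sig : List Int) (c : Char) : List Int :=
  PySem.List.pySetD sig ((c.toNat : Int) - 97)
    (PySem.List.pyGetD sig ((c.toNat : Int) - 97) 0 + 1)

def pvFreq (w : List Char) : List Int := w.foldl pvBmp (List.replicate 26 0)

-- normalized Nat position of Python index i in a list of length n
def pvNormI (i : Int) (n : Nat) : Nat := if i < 0 then (i + n).toNat else i.toNat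

def pvBumpAt (p : Nat) (d : Int) (xs : List Int) : List Int := xs.set p (xs.getD p 0 + d)

def pvPos (c : Char) : Nat := pvNormI ((c.toNat : Int) - 97) 26

theorem pvNormI_lt (i : Int) (n : Nat) (h1 : -(n : Int) ≤ i) (h2 : i < n) :
    pvNormI i n < n := by unfold pvNormI; split_ifs <;> omega

theorem pySetD_norm (xs : List Int) (i v : Int) (h1 : -(xs.length : Int) ≤ i)
    (h2 : i < xs.length) :
    PySem.List.pySetD xs i v = xs.set (pvNormI i xs.length) v := by
  by_cases hi : i < 0
  · simp only [PySem.List.pySetD, PySem.List.pySet?, PySem.List.pyIdx?, pvNormI,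
      if_pos hi, if_neg (not_le.2 hi), if_pos h1]
    simp
    congr 1
    omega
  · rw [PySem.List.pySetD_of_nonneg xs v (not_lt.1 hi), pvNormI, if_neg hi]

theorem pyGetD_norm (xs : List Int) (i d : Int) (h1 : -(xs.length : Int) ≤ i)
    (h2 : i < xs.length) :
    PySem.List.pyGetD xs i d = xs.getD (pvNormI i xs.length) d := by
  by_cases hi : i < 0
  · simp only [PySem.List.pyGetD, PySem.List.pyGet?, PySem.List.pyIdx?, pvNormI,
      if_pos hi, if_neg (not_le.2 hi), if_pos h1]
    simp [List.getD_eq_getElem?_getD]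
    congr 2
    omega
  · rw [PySem.List.pyGetD_eq_getElem xs d (not_lt.1 hi) h2, pvNormI, if_neg hi,
      List.getD_eq_getElem xs d (by omega)]

theorem pvBump_norm (xs : List Int) (i d : Int) (h1 : -(xs.length : Int) ≤ i)
    (h2 : i < xs.length) :
    pvBump xs i d = pvBumpAt (pvNormI i xs.length) d xs := by
  rw [pvBump, pvBumpAt, pySetD_norm xs i _ h1 h2, pyGetD_norm xs i 0 h1 h2]

theorem pvGood_bounds (c : Char) (hc : pvGood c) (n : Nat) (hn : n = 26) :
    -(n : Int) ≤ (c.toNat : Int) - 97 ∧ (c.toNat : Int) - 97 < n := by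
  rcases hc with ⟨hA, hB⟩
  subst hn
  constructor <;> omega

theorem pvBmp_eq_bumpAt (xs : List Int) (c : Char) (hx : xs.length = 26) (hc : pvGood c) :
    pvBmp xs c = pvBumpAt (pvPos c) 1 xs := by
  obtain ⟨hb1, hb2⟩ := pvGood_bounds c hc xs.length hx
  rw [pvBmp, ← pvBump, pvBump_norm xs _ 1 hb1 hb2, pvPos, hx]

theorem pvPos_lt (c : Char) (hc : pvGood c) : pvPos c < 26 := by
  obtain ⟨hb1, hb2⟩ := pvGood_bounds c hc 26 rfl
  exact pvNormI_lt _ _ hb1 hb2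

theorem length_pvBumpAt (p : Nat) (d : Int) (xs : List Int) :
    (pvBumpAt p d xs).length = xs.length := by simp [pvBumpAt]

theorem length_pvBmp (xs : List Int) (c : Char) : (pvBmp xs c).length = xs.length := by
  simp [pvBmp, PySem.List.length_pySetD]

theorem getD_set_self (xs : List Int) (p : Nat) (v d : Int) (hp : p < xs.length) :
    (xs.set p v).getD p d = v := by
  simp [List.getD_eq_getElem?_getD, hp]

theorem getD_set_ne (xs : List Int) (p q : Nat) (v d : Int) (h : p ≠ q) :
    (xs.set p v).getD q d = xs.getD q d := by
  simp [List.getD_eq_getElem?_getD, List.getElem?_set_ne h]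

theorem pvBumpAt_same (xs : List Int) (p : Nat) (d e : Int) (hp : p < xs.length) :
    pvBumpAt p d (pvBumpAt p e xs) = pvBumpAt p (e + d) xs := by
  simp only [pvBumpAt, getD_set_self xs p _ _ hp, List.set_set]
  congr 1; ring

theorem pvBumpAt_zero (xs : List Int) (p : Nat) (hp : p < xs.length) :
    pvBumpAt p 0 xs = xs := by
  rw [pvBumpAt, add_zero, List.getD_eq_getElem xs 0 hp]
  exact List.set_getElem_self hp

theorem pvBumpAt_comm (xs : List Int) (p q : Nat) (d e : Int) (h : p ≠ q) :
    pvBumpAt p d (pvBumpAt q e xs) = pvBumpAt q e (pvBumpAt p d xs) := by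
  simp only [pvBumpAt, getD_set_ne _ _ _ _ _ h, getD_set_ne _ _ _ _ _ (Ne.symm h)]
  exact List.set_comm _ _ (Ne.symm h)

theorem pvBmp_comm (xs : List Int) (a c : Char) (hx : xs.length = 26)
    (ha : pvGood a) (hc : pvGood c) :
    pvBmp (pvBmp xs c) a = pvBmp (pvBmp xs a) c := by
  have hxc : (pvBmp xs c).length = 26 := by rw [length_pvBmp, hx]
  have hxa : (pvBmp xs a).length = 26 := by rw [length_pvBmp, hx]
  rw [pvBmp_eq_bumpAt _ _ hxc ha, pvBmp_eq_bumpAt _ _ hx hc,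
      pvBmp_eq_bumpAt _ _ hxa hc, pvBmp_eq_bumpAt _ _ hx ha]
  by_cases hpq : pvPos a = pvPos c
  · rw [hpq, pvBumpAt_same _ _ _ _ (by rw [hx]; exact pvPos_lt c hc)]
  · exact pvBumpAt_comm xs _ _ _ _ hpq

theorem length_foldl_pvBmp (w : List Char) : ∀ (u : List Int),
    (w.foldl pvBmp u).length = u.length := by
  induction w with
  | nil => intro u; rfl
  | cons c w ih => intro u; rw [List.foldl_cons, ih, length_pvBmp]

theorem pvBmp_foldl_comm (w : List Char) : ∀ (xs : List Int), xs.length = 26 →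
    (∀ c ∈ w, pvGood c) → ∀ (a : Char), pvGood a →
    pvBmp (w.foldl pvBmp xs) a = w.foldl pvBmp (pvBmp xs a) := by
  induction w with
  | nil => intro xs _ _ a _; rfl
  | cons c w ih =>
    intro xs hx hw a ha
    simp only [List.foldl_cons]
    rw [ih (pvBmp xs c) (by rw [length_pvBmp, hx]) (fun d hd => hw d (List.mem_cons_of_mem _ hd)) a ha,
        pvBmp_comm xs a c hx ha (hw c List.mem_cons_self)]

theorem pvFreq_cons (c : Char) (w : List Char) (hc : pvGood c) (hw : ∀ d ∈ w, pvGood d) :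
    pvFreq (c :: w) = pvBmp (pvFreq w) c := by
  rw [pvFreq, pvFreq, List.foldl_cons,
    pvBmp_foldl_comm w (List.replicate 26 0) (by simp) hw c hc]

theorem pvFreq_append (w : List Char) (c : Char) :
    pvFreq (w ++ [c]) = pvBmp (pvFreq w) c := by
  rw [pvFreq, pvFreq, List.foldl_append, List.foldl_cons, List.foldl_nil]

theorem length_pvFreq (w : List Char) : (pvFreq w).length = 26 := by
  rw [pvFreq, length_foldl_pvBmp]; simp

-- bump by -1 at c's position undoes the +1 of pvBmp
theorem pvCancel (F : List Int) (c : Char) (hF : F.length = 26) (hc : pvGood c) :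
    pvBump (pvBmp F c) ((c.toNat : Int) - 97) (-1) = F := by
  obtain ⟨hb1, hb2⟩ := pvGood_bounds c hc F.length hF
  rw [pvBmp_eq_bumpAt F c hF hc,
    pvBump_norm _ _ _ (by rw [length_pvBumpAt]; exact hb1) (by rw [length_pvBumpAt]; exact hb2)]
  rw [show pvNormI ((c.toNat : Int) - 97) (pvBumpAt (pvPos c) 1 F).length = pvPos c by
    rw [length_pvBumpAt, hF]; rfl]
  rw [pvBumpAt_same _ _ _ _ (by rw [hF]; exact pvPos_lt c hc),
    show (1 : Int) + (-1) = 0 by norm_num]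
  exact pvBumpAt_zero _ _ (by rw [hF]; exact pvPos_lt c hc)

-- bump by -1 then +1 at the same position is the identity
theorem pvCancel2 (F : List Int) (c : Char) (hF : F.length = 26) (hc : pvGood c) :
    pvBump (pvBump F ((c.toNat : Int) - 97) (-1)) ((c.toNat : Int) - 97) 1 = F := by
  obtain ⟨hb1, hb2⟩ := pvGood_bounds c hc F.length hF
  rw [pvBump_norm F _ _ hb1 hb2]
  rw [pvBump_norm _ _ _ (by rw [length_pvBumpAt]; exact hb1) (by rw [length_pvBumpAt]; exact hb2)]
  rw [show pvNormI ((c.toNat : Int) - 97) (pvBumpAt (pvNormI ((c.toNat : Int) - 97) F.length) (-1) F).length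
      = pvNormI ((c.toNat : Int) - 97) F.length by rw [length_pvBumpAt]]
  rw [pvBumpAt_same _ _ _ _ (pvNormI_lt _ _ hb1 hb2),
    show (-1 : Int) + 1 = 0 by norm_num]
  exact pvBumpAt_zero _ _ (pvNormI_lt _ _ hb1 hb2)

theorem pvBmp_eq_pvBump (sig : List Int) (c : Char) :
    pvBmp sig c = pvBump sig ((c.toNat : Int) - 97) 1 := rfl

-- the sliding step applied to the fresh frequency of window j gives the fresh
-- frequency of window j+1
theorem pvSlide_freq (cs : List Char) (l : Int) (j : Nat) (hl : 0 ≤ l)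
    (hj : j + l.toNat + 1 ≤ cs.length) (hg : ∀ c ∈ cs, pvGood c) :
    pvSlide cs l (pvFreq ((cs.drop j).take l.toNat)) ((j : Int) + l)
      = pvFreq ((cs.drop (j + 1)).take l.toNat) := by
  have hLlt : j + l.toNat < cs.length := by omega
  have hjlt : j < cs.length := by omega
  have hgj : pvGood cs[j] := hg _ (List.getElem_mem hjlt)
  have hChj : pvChIdx cs ((j : Int) + l - l) = ((cs[j].toNat : Int) - 97) := by
    rw [show (j : Int) + l - l = (j : Int) by ring, pvChIdx,
      PySem.List.pyGetD_eq_getElem cs 'a' (Int.natCast_nonneg j) (by exact_mod_cast hjlt)]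
    simp only [Int.toNat_natCast]
  have hChjl : pvChIdx cs ((j : Int) + l) = ((cs[j + l.toNat].toNat : Int) - 97) := by
    rw [show (j : Int) + l = ((j + l.toNat : Nat) : Int) by push_cast; omega, pvChIdx,
      PySem.List.pyGetD_eq_getElem cs 'a' (Int.natCast_nonneg _) (by exact_mod_cast hLlt)]
    simp only [Int.toNat_natCast]
  rcases Nat.eq_zero_or_pos l.toNat with hL0 | hLpos
  · -- l = 0 : every window is empty; the two bumps at the same position cancel
    have hjj : cs[j + l.toNat] = cs[j] := by congr 1; omega
    rw [hL0]
    simp only [List.take_zero]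
    rw [pvSlide, hChj, hChjl, hjj]
    exact pvCancel2 (pvFreq []) cs[j] (length_pvFreq []) hgj
  · -- l ≥ 1 : window j = cs[j] :: W', window j+1 = W' ++ [cs[j+l]]
    set L := l.toNat with hLdef
    have hdropj : cs.drop j = cs[j] :: cs.drop (j + 1) := List.drop_eq_getElem_cons hjlt
    have hW : (cs.drop j).take L = cs[j] :: (cs.drop (j + 1)).take (L - 1) := by
      conv_lhs => rw [hdropj, show L = (L - 1) + 1 by omega, List.take_succ_cons]
    have hlen1 : L - 1 < (cs.drop (j + 1)).length := by
      rw [List.length_drop]; omega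
    have hget : (cs.drop (j + 1))[L - 1] = cs[j + L] := by
      rw [List.getElem_drop]; congr 1; omega
    have hW1 : (cs.drop (j + 1)).take L = ((cs.drop (j + 1)).take (L - 1)) ++ [cs[j + L]] := by
      conv_lhs => rw [show L = (L - 1) + 1 by omega, List.take_add_one]
      rw [List.getElem?_eq_getElem hlen1, hget]
      simp
    have hgood' : ∀ d ∈ (cs.drop (j + 1)).take (L - 1), pvGood d := fun d hd =>
      hg d (List.mem_of_mem_drop (List.mem_of_mem_take hd))
    have hfreqW : pvFreq ((cs.drop j).take L)
        = pvBmp (pvFreq ((cs.drop (j + 1)).take (L - 1))) cs[j] := by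
      rw [hW, pvFreq_cons _ _ hgj hgood']
    rw [pvSlide, hChj, hChjl, hfreqW, hW1, pvFreq_append,
      pvCancel _ _ (length_pvFreq _) hgj, pvBmp_eq_pvBump]

-- the list of successive cur-states produced by repeatedly applying g
def pvTrace (g : List Int → Int → List Int) (c : List Int) : List Int → List (List Int)
  | [] => []
  | i :: r => g c i :: pvTrace g (g c i) r

-- per-window fresh signature, as a function of the (Int) start index
def pvFW (cs : List Char) (l : Int) (t : Int) : List Int :=
  pvFreq ((cs.drop t.toNat).take l.toNat)

theorem pvTrace_windows (cs : List Char) (l : Int) (hl : 0 ≤ l) (hg : ∀ c ∈ cs, pvGood c) :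
    ∀ (k j : Nat), j + l.toNat + k = cs.length →
    pvTrace (pvSlide cs l) (pvFW cs l j) (PySem.List.pyRange ((j : Int) + l) (cs.length : Int) 1)
      = (PySem.List.pyRange ((j : Int) + 1) ((cs.length : Int) - l + 1) 1).map (pvFW cs l) := by
  intro k
  induction k with
  | zero =>
    intro j hj
    rw [PySem.List.pyRange_one_eq_nil (by omega),
      PySem.List.pyRange_one_eq_nil (by omega)]
    rfl
  | succ k ih =>
    intro j hj
    have h1 : (j : Int) + l < (cs.length : Int) := by omega
    have h2 : (j : Int) + 1 < (cs.length : Int) - l + 1 := by omega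
    rw [PySem.List.pyRange_one_cons h1, PySem.List.pyRange_one_cons h2]
    have hslide : pvSlide cs l (pvFW cs l j) ((j : Int) + l) = pvFW cs l ((j : Int) + 1) := by
      have := pvSlide_freq cs l j hl (by omega) hg
      rw [pvFW, pvFW, show ((j : Int) + 1).toNat = j + 1 by omega,
        show ((j : Int) : Int).toNat = j by omega]
      exact this
    rw [pvTrace, hslide, List.map_cons]
    have := ih (j + 1) (by omega)
    push_cast at this
    rw [show (j : Int) + l + 1 = (j : Int) + 1 + l by ring, this]

-- A's initialisation loop computes the fresh signature of window 0
theorem pvInit_freq (cs : List Char) (l : Int) (hl : 0 ≤ l) (hln : l ≤ (cs.length : Int)) :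
    (PySem.List.pyRange 0 l 1).foldl (fun cur i => pvBump cur (pvChIdx cs i) 1)
        ((PySem.List.pyRange 0 26 1).map (fun _ => (0 : Int)))
      = pvFW cs l 0 := by
  have hz : ((PySem.List.pyRange 0 26 1).map (fun _ => (0 : Int))) = List.replicate 26 0 := by decide
  set ts := cs.take l.toNat with hts
  have hlen : ((ts.length : Int)) = l := by
    rw [hts, List.length_take]; omega
  have hstep : ∀ i ∈ PySem.List.pyRange 0 l 1,
      PySem.List.pyGetD ts i 'a' = PySem.List.pyGetD cs i 'a' := by
    intro i hi
    rw [PySem.List.mem_pyRange_one] at hi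
    have hilt : i < ((ts.length : Int)) := by omega
    rw [PySem.List.pyGetD_eq_getElem ts 'a' hi.1 hilt,
      PySem.List.pyGetD_eq_getElem cs 'a' hi.1
        (by rw [hts, List.length_take] at hilt; push_cast at hilt ⊢; omega),
      ]
    simp only [hts, List.getElem_take]
  calc (PySem.List.pyRange 0 l 1).foldl (fun cur i => pvBump cur (pvChIdx cs i) 1)
        ((PySem.List.pyRange 0 26 1).map (fun _ => (0 : Int)))
      = (PySem.List.pyRange 0 l 1).foldl
          (fun cur i => pvBmp cur (PySem.List.pyGetD ts i 'a')) (List.replicate 26 0) := by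
        rw [hz]
        exact PySem.List.foldl_congr_mem _ _ _ _ (fun cur i hi => by rw [hstep i hi]; rfl)
    _ = ts.foldl pvBmp (List.replicate 26 0) := by
        rw [← hlen, ← PySem.List.len_eq]
        exact PySem.List.foldl_pyRange_zero_pyGetD ts 'a' pvBmp _
    _ = pvFW cs l 0 := by
        rw [pvFW, show (0 : Int).toNat = 0 from rfl, List.drop_zero, ← hts, pvFreq]

-- ---- the pair-counting machinery: A's running count equals sum of C(c,2) ----

-- A's counting step, abstracted over the signature being processed
def pvCStep (am : Int × PySem.Dict (List Int) Int)
    (t : List Int) : Int × PySem.Dict (List Int) Int :=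
  match am.2.get? t with
  | some v => (am.1 + v, am.2.insert t (v + 1))
  | none => (am.1, am.2.insert t 1)

def pvF (c : Int) : Int := PySem.Int.floordiv (c * (c - 1)) 2

def pvSumC (m : PySem.Dict (List Int) Int) : Int :=
  m.values.foldl (fun acc c => acc + PySem.Int.floordiv (c * (c - 1)) 2) 0

theorem pvCStep_eq (am : Int × PySem.Dict (List Int) Int) (t : List Int) :
    pvCStep am t = (am.1 + am.2.getD t 0, am.2.insert t (am.2.getD t 0 + 1)) := by
  cases h : am.2.get? t <;>
    simp [pvCStep, h, PySem.Dict.getD_eq_get?_getD]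

theorem pvL1 (cs : List Char) (l : Int) :
    ∀ (r : List Int) (a : Int) (m : PySem.Dict (List Int) Int) (c : List Int),
    r.foldl (pvAStep cs l) (a, m, c)
      = (((pvTrace (pvSlide cs l) c r).foldl pvCStep (a, m)).1,
         ((pvTrace (pvSlide cs l) c r).foldl pvCStep (a, m)).2,
         r.foldl (pvSlide cs l) c)
  | [], a, m, c => rfl
  | i :: r, a, m, c => by
    simp only [List.foldl_cons, pvTrace]
    have hstep : pvAStep cs l (a, m, c) i
        = (((pvCStep (a, m) (pvSlide cs l c i)).1, (pvCStep (a, m) (pvSlide cs l c i)).2,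
            pvSlide cs l c i)) := by
      cases h : m.get? (pvSlide cs l c i) <;> simp [pvAStep, pvCStep, h]
    rw [hstep, pvL1 cs l r]

theorem pvFoldF : ∀ (vs : List Int) (a : Int),
    vs.foldl (fun acc c => acc + PySem.Int.floordiv (c * (c - 1)) 2) a
      = a + (vs.map pvF).sum
  | [], a => by simp
  | v :: vs, a => by
    simp only [List.foldl_cons, List.map_cons, List.sum_cons, pvFoldF vs]
    simp [pvF, add_assoc]

theorem pvSumC_eq_sum (m : PySem.Dict (List Int) Int) :
    pvSumC m = (m.values.map pvF).sum := by
  rw [pvSumC, pvFoldF, zero_add]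

theorem pvF_succ (c : Int) : pvF (c + 1) = pvF c + c := by
  have h2 : (0 : Int) < 2 := by norm_num
  rw [pvF, pvF, PySem.Int.floordiv_eq_ediv_of_pos h2, PySem.Int.floordiv_eq_ediv_of_pos h2]
  have h : (c + 1) * (c + 1 - 1) = c * (c - 1) + c * 2 := by ring
  rw [h, Int.add_mul_ediv_right _ _ (by norm_num : (2 : Int) ≠ 0)]

theorem pvF_one : pvF 1 = 0 := by decide

theorem pvSum_update (t : List Int) (x : Int) (G : List Int → Int) :
    ∀ (ks : List (List Int)), ks.Nodup → t ∈ ks →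
    (ks.map (fun k => if k = t then x else G k)).sum = (ks.map G).sum + x - G t := by
  intro ks
  induction ks with
  | nil => intro _ ht; cases ht
  | cons k ks ih =>
    intro hnd ht
    have hnd' := List.nodup_cons.1 hnd
    rcases List.mem_cons.1 ht with h | h
    · subst h
      have hrest : (ks.map (fun k' => if k' = t then x else G k')).sum = (ks.map G).sum :=
        congrArg List.sum
          (List.map_congr_left fun a ha => if_neg (fun e => hnd'.1 (by rw [← e]; exact ha)))
      simp only [List.map_cons, List.sum_cons, hrest, if_true]
      ring
    · have hne : k ≠ t := fun e => hnd'.1 (by rw [e]; exact h)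
      simp only [List.map_cons, List.sum_cons, if_neg hne, ih hnd'.2 h]
      ring

theorem pvSumC_insert (m : PySem.Dict (List Int) Int) (t : List Int)
    (hk : m.keys.Nodup) :
    pvSumC (m.insert t (m.getD t 0 + 1)) = pvSumC m + m.getD t 0 := by
  have hk' : (m.insert t (m.getD t 0 + 1)).keys.Nodup := PySem.Dict.nodup_keys_insert _ _ _ hk
  by_cases hc : m.contains t = true
  · have ht : t ∈ m.keys := (PySem.Dict.contains_iff_mem_keys m t).1 hc
    rw [pvSumC_eq_sum, pvSumC_eq_sum,
        PySem.Dict.values_eq_map_keys _ hk' 0, PySem.Dict.values_eq_map_keys _ hk 0,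
        PySem.Dict.keys_insert_of_contains m _ hc, List.map_map, List.map_map]
    have hmap : m.keys.map (pvF ∘ fun k => (m.insert t (m.getD t 0 + 1)).getD k 0)
        = m.keys.map (fun k => if k = t then pvF (m.getD t 0 + 1) else pvF (m.getD k 0)) := by
      refine List.map_congr_left fun k _ => ?_
      simp only [Function.comp_apply, PySem.Dict.getD_insert, apply_ite pvF]
    rw [hmap, pvSum_update t _ _ m.keys hk ht, pvF_succ]
    simp only [Function.comp_def]
    ring
  · have hc' : m.contains t = false := by simpa using hc
    have ht : t ∉ m.keys := fun h => by
      rw [(PySem.Dict.contains_iff_mem_keys m t).2 h] at hc'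
      exact absurd hc' (by simp)
    have hd0 : m.getD t 0 = 0 := PySem.Dict.getD_of_not_contains m 0 hc'
    rw [pvSumC_eq_sum, pvSumC_eq_sum,
        PySem.Dict.values_eq_map_keys _ hk' 0, PySem.Dict.values_eq_map_keys _ hk 0,
        PySem.Dict.keys_insert_of_not_contains m _ hc']
    simp only [List.map_append, List.map_map, List.sum_append]
    have hmap : m.keys.map (pvF ∘ fun k => (m.insert t (m.getD t 0 + 1)).getD k 0)
        = m.keys.map (pvF ∘ fun k => m.getD k 0) := by
      refine List.map_congr_left fun k hkk => ?_
      simp only [Function.comp_apply]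
      rw [PySem.Dict.getD_insert_of_ne _ _ _ (fun e => ht (by rw [← e]; exact hkk))]
    rw [hmap, hd0]
    simp [PySem.Dict.getD_insert_self, pvF_one]

theorem pvL4 : ∀ (ts : List (List Int)) (a : Int) (m : PySem.Dict (List Int) Int),
    m.keys.Nodup → a = pvSumC m →
    (ts.foldl pvCStep (a, m)).1
      = pvSumC (ts.foldl (fun d t => d.insert t (d.getD t 0 + 1)) m)
  | [], a, m, _, ha => by simpa using ha
  | t :: ts, a, m, hk, ha => by
    simp only [List.foldl_cons, pvCStep_eq]
    exact pvL4 ts _ _ (PySem.Dict.nodup_keys_insert _ _ _ hk)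
      (by rw [ha, pvSumC_insert m t hk])

-- ---- B's prefix-sum table and the window signature it yields ----

-- B's first loop: the running list of prefix snapshots
theorem pvPrefixFold (w : List Char) : ∀ (acc : List (List Int)) (u : List Int),
    w.foldl (fun (st : List (List Int) × List Int) c =>
        let cur := PySem.List.pySetD st.2 ((c.toNat : Int) - 97)
          (PySem.List.pyGetD st.2 ((c.toNat : Int) - 97) 0 + 1)
        (st.1 ++ [cur], cur)) (acc, u)
      = (acc ++ (List.range w.length).map (fun j => (w.take (j + 1)).foldl pvBmp u),
         w.foldl pvBmp u) := by
  induction w with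
  | nil => intro acc u; simp
  | cons c w ih =>
    intro acc u
    rw [List.foldl_cons]
    refine (ih (acc ++ [pvBmp u c]) (pvBmp u c)).trans ?_
    rw [List.length_cons, List.range_succ_eq_map, List.map_cons, List.map_map,
      List.append_assoc, List.singleton_append]
    exact congrArg₂ Prod.mk
      (congrArg (acc ++ ·) (congrArg₂ List.cons rfl (List.map_congr_left fun j _ => rfl))) rfl

-- the prefix table is the list of prefix frequencies
theorem pvPre_eq (cs : List Char) :
    (cs.foldl (fun (st : List (List Int) × List Int) c =>
        let cur := PySem.List.pySetD st.2 ((c.toNat : Int) - 97)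
          (PySem.List.pyGetD st.2 ((c.toNat : Int) - 97) 0 + 1)
        (st.1 ++ [cur], cur))
      ([List.replicate 26 0], List.replicate 26 0)).1
      = (List.range (cs.length + 1)).map (fun j => pvFreq (cs.take j)) := by
  rw [pvPrefixFold cs [List.replicate 26 0] (List.replicate 26 0)]
  rw [List.range_succ_eq_map, List.map_cons, List.map_map, List.singleton_append]
  rfl

-- indexing the prefix table
theorem pvPreGet (cs : List Char) (j : Int) (h0 : 0 ≤ j) (h1 : j ≤ (cs.length : Int)) :
    PySem.List.pyGetD ((List.range (cs.length + 1)).map (fun i => pvFreq (cs.take i))) j []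
      = pvFreq (cs.take j.toNat) := by
  rw [PySem.List.pyGetD_eq_getElem _ [] h0 (by simp; omega)]
  simp

theorem pvPyGetD_getD (X : List Int) (k : Int) (h0 : 0 ≤ k) (h1 : k < (X.length : Int)) :
    PySem.List.pyGetD X k 0 = X.getD k.toNat 0 := by
  rw [PySem.List.pyGetD_eq_getElem X 0 h0 h1, List.getD_eq_getElem X 0 (by omega)]

theorem pvGetD_replicate (k : Nat) : (List.replicate 26 (0 : Int)).getD k 0 = 0 := by
  rw [List.getD_eq_getElem?_getD, List.getElem?_replicate]
  split <;> simp

theorem pvGetD_pvBmp (x : List Int) (c : Char) (k : Nat) (hx : x.length = 26)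
    (hc : pvGood c) (_hk : k < 26) :
    (pvBmp x c).getD k 0 = x.getD k 0 + (if pvPos c = k then 1 else 0) := by
  rw [pvBmp_eq_bumpAt x c hx hc, pvBumpAt]
  by_cases h : pvPos c = k
  · rw [if_pos h, ← h, getD_set_self x _ _ _ (by rw [hx]; exact pvPos_lt c hc)]
  · rw [if_neg h, getD_set_ne x _ _ _ _ h, add_zero]

-- frequencies add along a split of the character list
theorem pvFreq_add (w : List Char) : ∀ (u : List Int) (k : Nat), u.length = 26 →
    (∀ c ∈ w, pvGood c) → k < 26 →
    (w.foldl pvBmp u).getD k 0 = u.getD k 0 + (pvFreq w).getD k 0 := by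
  induction w with
  | nil =>
    intro u k _ _ _
    simp only [List.foldl_nil]
    rw [pvFreq, List.foldl_nil, pvGetD_replicate, add_zero]
  | cons c w ih =>
    intro u k hu hw hk
    have hc : pvGood c := hw c List.mem_cons_self
    have hw' : ∀ d ∈ w, pvGood d := fun d hd => hw d (List.mem_cons_of_mem _ hd)
    rw [List.foldl_cons, ih (pvBmp u c) k (by rw [length_pvBmp, hu]) hw' hk,
      pvFreq_cons c w hc hw', pvGetD_pvBmp u c k hu hc hk,
      pvGetD_pvBmp (pvFreq w) c k (length_pvFreq w) hc hk]
    ring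

-- the componentwise prefix difference is the window's frequency signature
theorem pvDiffSig (cs : List Char) (l : Int) (_hl : 0 ≤ l) (j : Nat)
    (_hj : j + l.toNat ≤ cs.length) (hg : ∀ c ∈ cs, pvGood c) :
    (PySem.List.pyRange 0 26 1).map (fun k =>
        PySem.List.pyGetD (pvFreq (cs.take (j + l.toNat))) k 0
          - PySem.List.pyGetD (pvFreq (cs.take j)) k 0)
      = pvFreq ((cs.drop j).take l.toNat) := by
  have hwin : ∀ d ∈ (cs.drop j).take l.toNat, pvGood d := fun d hd =>
    hg d (List.mem_of_mem_drop (List.mem_of_mem_take hd))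
  have hsplit : cs.take (j + l.toNat) = cs.take j ++ (cs.drop j).take l.toNat :=
    List.take_add
  conv_rhs => rw [← PySem.List.map_pyGetD_pyRange_zero' (pvFreq ((cs.drop j).take l.toNat)) 0]
  rw [length_pvFreq, show ((26 : Nat) : Int) = (26 : Int) by norm_num]
  refine List.map_congr_left fun k hk => ?_
  rw [PySem.List.mem_pyRange_one] at hk
  have hk26 : k.toNat < 26 := by omega
  rw [pvPyGetD_getD _ k hk.1 (by rw [length_pvFreq]; omega),
    pvPyGetD_getD _ k hk.1 (by rw [length_pvFreq]; omega),
    pvPyGetD_getD _ k hk.1 (by rw [length_pvFreq]; omega)]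
  have hcat : pvFreq (cs.take (j + l.toNat))
      = ((cs.drop j).take l.toNat).foldl pvBmp (pvFreq (cs.take j)) := by
    rw [hsplit, pvFreq, List.foldl_append]
    rfl
  rw [hcat, pvFreq_add _ _ _ (length_pvFreq _) hwin hk26]
  ring

-- B's tuple for start j is the fresh signature of window j
theorem pvTSig (cs : List Char) (l : Int) (hl : 0 ≤ l) (hln : l ≤ (cs.length : Int))
    (hg : ∀ c ∈ cs, pvGood c) :
    ∀ j ∈ PySem.List.pyRange 0 ((cs.length : Int) - l + 1) 1,
    (PySem.List.pyRange 0 26 1).map (fun k =>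
        PySem.List.pyGetD
          (PySem.List.pyGetD ((List.range (cs.length + 1)).map (fun i => pvFreq (cs.take i))) (j + l) []) k 0
          - PySem.List.pyGetD
            (PySem.List.pyGetD ((List.range (cs.length + 1)).map (fun i => pvFreq (cs.take i))) j []) k 0)
      = pvFW cs l j := by
  intro j hj
  rw [PySem.List.mem_pyRange_one] at hj
  rw [pvPreGet cs (j + l) (by omega) (by omega), pvPreGet cs j hj.1 (by omega),
    show (j + l).toNat = j.toNat + l.toNat by omega]
  exact pvDiffSig cs l hl j.toNat (by omega) hg

theorem pvFoldIns (F : Int → List Int) : ∀ (r : List Int) (d : PySem.Dict (List Int) Int),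
    r.foldl (fun d j => d.insert (F j) (d.getD (F j) 0 + 1)) d
      = (r.map F).foldl (fun d t => d.insert t (d.getD t 0 + 1)) d
  | [], _ => rfl
  | j :: r, d => by
    simp only [List.foldl_cons, List.map_cons]
    exact pvFoldIns F r _

-- the central computation: A's running answer = B's grouped pair count
theorem pv_main (s : String) (l : Int) (hpre : Pre_compute_pairs_of_length s l) :
    compute_pairs_of_length s l = compute_pairs_of_length_alt s l := by
  obtain ⟨hl, hln, hall⟩ := hpre
  set cs := s.toList with hcs
  have hg : ∀ c ∈ cs, pvGood c := by
    intro c hc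
    have := List.all_eq_true.1 hall c hc
    exact ⟨by simpa using (Bool.and_elim_left this : _), by simpa using (Bool.and_elim_right this : _)⟩
  rw [compute_pairs_of_length, compute_pairs_of_length_alt]
  simp only [← hcs]
  rw [pvL1, pvInit_freq cs l hl hln]
  have htr := pvTrace_windows cs l hl hg (cs.length - l.toNat) 0 (by omega)
  rw [show ((0 : Nat) : Int) + l = l by omega, show ((0 : Nat) : Int) + 1 = 1 by norm_num] at htr
  rw [show pvFW cs l ((0 : Nat) : Int) = pvFW cs l 0 by norm_num] at htr
  rw [htr]
  -- left: fold pvCStep over the mapped windows starting from ({FW 0 : 1}, 0)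
  have hm0nodup : (PySem.Dict.empty.insert (pvFW cs l 0) (1 : Int)).keys.Nodup :=
    PySem.Dict.nodup_keys_insert _ _ _ PySem.Dict.nodup_keys_empty
  have hsum0 : (0 : Int) = pvSumC (PySem.Dict.empty.insert (pvFW cs l 0) 1) := by
    rw [pvSumC_eq_sum, PySem.Dict.values_eq_map_keys _ hm0nodup 0,
        PySem.Dict.keys_insert_of_not_contains PySem.Dict.empty _ (PySem.Dict.contains_empty _),
        PySem.Dict.keys_empty]
    simp [PySem.Dict.getD_insert_self, pvF_one]
  rw [pvL4 _ 0 _ hm0nodup hsum0]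
  -- right: B's fold with the prefix-difference tuples rewritten to pvFW
  have hB : (PySem.List.pyRange 0 ((cs.length : Int) - l + 1) 1).foldl
      (fun (d : PySem.Dict (List Int) Int) j =>
        let a := PySem.List.pyGetD (cs.foldl
          (fun (st : List (List Int) × List Int) c =>
            let cur := PySem.List.pySetD st.2 ((c.toNat : Int) - 97)
              (PySem.List.pyGetD st.2 ((c.toNat : Int) - 97) 0 + 1)
            (st.1 ++ [cur], cur))
          ([List.replicate 26 0], List.replicate 26 0)).1 j []
        let b := PySem.List.pyGetD (cs.foldl
          (fun (st : List (List Int) × List Int) c =>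
            let cur := PySem.List.pySetD st.2 ((c.toNat : Int) - 97)
              (PySem.List.pyGetD st.2 ((c.toNat : Int) - 97) 0 + 1)
            (st.1 ++ [cur], cur))
          ([List.replicate 26 0], List.replicate 26 0)).1 (j + l) []
        let t := (PySem.List.pyRange 0 26 1).map
          (fun k => PySem.List.pyGetD b k 0 - PySem.List.pyGetD a k 0)
        d.insert t (d.getD t 0 + 1))
      PySem.Dict.empty
      = (PySem.List.pyRange 0 ((cs.length : Int) - l + 1) 1).foldl
        (fun (d : PySem.Dict (List Int) Int) j => d.insert (pvFW cs l j) (d.getD (pvFW cs l j) 0 + 1))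
        PySem.Dict.empty :=
    PySem.List.foldl_congr_mem _ _ _ _ (fun d j hj => by
      simp only [pvPre_eq cs, pvTSig cs l hl hln hg j hj])
  rw [hB, pvFoldIns (pvFW cs l)]
  -- both sides are pvSumC of the same insert-fold once the window lists agree
  have hsplit : PySem.List.pyRange 0 ((cs.length : Int) - l + 1) 1
      = 0 :: PySem.List.pyRange 1 ((cs.length : Int) - l + 1) 1 :=
    PySem.List.pyRange_one_cons (by omega)
  rw [hsplit, List.map_cons, List.foldl_cons]
  rw [show (PySem.Dict.empty : PySem.Dict (List Int) Int).insert (pvFW cs l 0)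
      ((PySem.Dict.empty : PySem.Dict (List Int) Int).getD (pvFW cs l 0) 0 + 1)
      = PySem.Dict.empty.insert (pvFW cs l 0) 1 by rw [PySem.Dict.getD_empty]; norm_num]
  rfl

-- ===== VERDICT (by name: the statement is the Claim_ definition above) =====
theorem compute_pairs_of_length_spec : Claim_equal_compute_pairs_of_length := by
  intro s l _ hpre
  unfold Spec_compute_pairs_of_length
  exact pv_main s l hpre
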